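-- pv_equiv track=rewrite | github.com/DataStas/Working_repo | algorithms/Yandex_tasks/data_stucts/set/second.py | count_interesting_pairs
-- ===== SOURCE A (Python) =====
-- def count_interesting_pairs(words):
--     count = 0
--     n = len(words[0])
--
--     for i in range(len(words)):
--         for j in range(i+1, len(words)):
--             diff_count = 0
--             for k in range(n):
--                 if words[i][k] != words[j][k]:
--                     diff_count += 1
--                     if diff_count > 1:
--                         break
--             if diff_count == 1:
--                 count += 1
--
--     return count
-- ===== SOURCE B (Python) =====
-- def count_interesting_pairs(words):
--     n = len(words[0])
--     total = 0
--     for k in range(n):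
--         groups = {}
--         for w in words:
--             p = w[:k] + w[k + 1:n]
--             groups[p] = groups.get(p, 0) + 1
--         for c in groups.values():
--             total += c * (c - 1) // 2
--     prefixes = {}
--     for w in words:
--         p = w[:n]
--         prefixes[p] = prefixes.get(p, 0) + 1
--     for c in prefixes.values():
--         total -= n * (c * (c - 1) // 2)
--     return total
-- ===== Notes on version B (the rewrite author's own statement) =====
-- stated objective: faster
-- what changed: Replaced the all-pairs character-by-character comparison with hashing: for each position k a dict counts words sharing the same one-wildcard pattern (word truncated to n with position k removed); the answer is the sum of same-group pairs minus n times the identical-prefix pairs.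
-- outside the precondition, e.g. on count_interesting_pairs(['abc', 'xy']): A returns 0, B returns 0; on count_interesting_pairs(['abc', 'xyz', 'pq']): A returns 0, B returns 0
import Mathlib
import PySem

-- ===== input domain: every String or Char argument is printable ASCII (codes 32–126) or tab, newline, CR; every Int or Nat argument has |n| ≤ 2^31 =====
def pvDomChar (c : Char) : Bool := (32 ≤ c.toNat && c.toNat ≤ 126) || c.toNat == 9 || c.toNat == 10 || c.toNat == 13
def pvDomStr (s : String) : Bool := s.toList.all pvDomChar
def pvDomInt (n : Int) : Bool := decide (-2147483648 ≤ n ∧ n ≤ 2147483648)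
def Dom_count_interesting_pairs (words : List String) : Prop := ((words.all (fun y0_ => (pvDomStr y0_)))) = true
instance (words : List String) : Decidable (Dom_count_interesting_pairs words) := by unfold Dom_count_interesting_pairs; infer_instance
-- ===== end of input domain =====

-- B replaces A's all-pairs character-by-character scan by hashing, per position k, each word's
-- one-wildcard pattern (the word, truncated to n = len(words[0]), with position k removed) and
-- summing same-group pairs, then subtracting n times the identical-prefix pairs.

-- ===== PORT A =====
-- inner 'for k in range(n)' loop with its break (returns diff_count)
def pvDiffLoopA (wi wj : List Char) : List Int → Int → Int
  | [], d => d
  | k :: ks, d =>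
    if PySem.List.pyGetD wi k '?' ≠ PySem.List.pyGetD wj k '?' then
      if d + 1 > 1 then d + 1 else pvDiffLoopA wi wj ks (d + 1)
    else pvDiffLoopA wi wj ks d

def count_interesting_pairs (words : List String) : Int :=
  let n : Int := PySem.Str.len (PySem.List.pyGetD words 0 "")
  (PySem.List.pyRange 0 (PySem.List.len words) 1).foldl (fun count i =>
    (PySem.List.pyRange (i + 1) (PySem.List.len words) 1).foldl (fun count j =>
      let diff_count := pvDiffLoopA (PySem.List.pyGetD words i "").toList
        (PySem.List.pyGetD words j "").toList (PySem.List.pyRange 0 n 1) 0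
      if diff_count = 1 then count + 1 else count) count) 0

-- w[:k] + w[k+1:n] : the word's characters with position k removed (truncated at n)
def pvPattern (n k : Int) (w : List Char) : List Char :=
  PySem.List.slice w none (some k) ++ PySem.List.slice w (some (k + 1)) (some n)

def count_interesting_pairs_alt (words : List String) : Int :=
  let n : Int := PySem.Str.len (PySem.List.pyGetD words 0 "")
  let total := (PySem.List.pyRange 0 n 1).foldl (fun total k =>
    let groups := words.foldl (fun (g : PySem.Dict (List Char) Int) w =>
      let p := pvPattern n k w.toList
      g.insert p (g.getD p 0 + 1)) PySem.Dict.empty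
    groups.values.foldl (fun t c => t + PySem.Int.floordiv (c * (c - 1)) 2) total) 0
  let prefixes := words.foldl (fun (g : PySem.Dict (List Char) Int) w =>
    let p := PySem.List.slice w.toList none (some n)
    g.insert p (g.getD p 0 + 1)) PySem.Dict.empty
  prefixes.values.foldl (fun t c => t - n * PySem.Int.floordiv (c * (c - 1)) 2) total

-- Pre_ excludes the empty list (words[0] raises IndexError) and ragged lists in which some word is
-- shorter than the first (there A raises IndexError except when two earlier character differences
-- happen to break the inner loop first — an accident of the break position).
def Pre_count_interesting_pairs (words : List String) : Prop :=
  words ≠ [] ∧ ∀ w ∈ words, (words.headD "").length ≤ w.length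
instance (words : List String) : Decidable (Pre_count_interesting_pairs words) := by
  unfold Pre_count_interesting_pairs; infer_instance

def pvWitness_count_interesting_pairs : List String := ["abc", "abd", "xbc"]

def Spec_count_interesting_pairs (words : List String) (out : Int) : Prop := out = count_interesting_pairs_alt words
instance (words : List String) (out : Int) : Decidable (Spec_count_interesting_pairs words out) := by unfold Spec_count_interesting_pairs; infer_instance





-- ===== CLAIM (what is proved, stated in full; the proofs are below) =====
def Claim_equal_count_interesting_pairs : Prop := ∀ (words : List String), Dom_count_interesting_pairs words → Pre_count_interesting_pairs words → Spec_count_interesting_pairs words (count_interesting_pairs words)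

-- ===== LEMMAS AND PROOFS =====

-- ========== proof-side definitions ==========
def pvC2 (c : Int) : Int := PySem.Int.floordiv (c * (c - 1)) 2

def pvPairs {α : Type} [BEq α] : List α → Int
  | [] => 0
  | x :: t => (t.count x : Int) + pvPairs t

def pvPC {α : Type} (F : α → α → Int) : List α → Int
  | [] => 0
  | w :: t => (t.map (F w)).sum + pvPC F t

lemma pvC2_zero : pvC2 0 = 0 := by decide

lemma pvC2_succ (c : Int) : pvC2 (c + 1) = pvC2 c + c := by
  unfold pvC2
  obtain ⟨m, hm⟩ : Even (c * (c - 1)) := Int.even_mul_pred_self c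
  have h1 : c * (c - 1) = 2 * m := by omega
  have h2 : (c + 1) * (c + 1 - 1) = 2 * (m + c) := by
    have : (c + 1) * (c + 1 - 1) = c * (c - 1) + 2 * c := by ring
    omega
  rw [h1, h2, PySem.Int.floordiv_eq_ediv_of_pos (by norm_num),
    PySem.Int.floordiv_eq_ediv_of_pos (by norm_num)]
  omega

lemma sum_map_update {α : Type} (S : List α) (x : α) (f f' : α → Int) (d : Int)
    (hS : S.Nodup) (hx : x ∈ S) (hne : ∀ v ∈ S, v ≠ x → f' v = f v) (hfx : f' x = f x + d) :
    (S.map f').sum = d + (S.map f).sum := by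
  induction S with
  | nil => simp at hx
  | cons s S' ih =>
    rcases List.nodup_cons.mp hS with ⟨hsn, hS'⟩
    rcases List.mem_cons.mp hx with rfl | hxS'
    · have : S'.map f' = S'.map f := List.map_congr_left (fun v hv => hne v (by simp [hv]) (by rintro rfl; exact hsn hv))
      simp [this, hfx]; ring
    · have hsx : s ≠ x := by rintro rfl; exact hsn hxS'
      have := ih hS' hxS' (fun v hv h => hne v (by simp [hv]) h)
      simp [this, hne s (by simp) hsx]; ring

lemma sum_C2_gen {α : Type} [BEq α] [LawfulBEq α] (xs S : List α) (hS : S.Nodup)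
    (hmem : ∀ a ∈ xs, a ∈ S) : (S.map (fun v => pvC2 (xs.count v))).sum = pvPairs xs := by
  induction xs generalizing S with
  | nil => simp [pvPairs, pvC2_zero]
  | cons x t ih =>
    have hx : x ∈ S := hmem x (by simp)
    have hstep : (S.map (fun v => pvC2 ((x :: t).count v))).sum
        = (t.count x : Int) + (S.map (fun v => pvC2 (t.count v))).sum := by
      apply sum_map_update S x _ _ _ hS hx
      · intro v _ hv; rw [List.count_cons_of_ne (by exact fun h => hv h.symm)]
      · rw [List.count_cons_self]; push_cast; rw [pvC2_succ]
    rw [hstep, ih S hS (fun a ha => hmem a (by simp [ha]))]; rfl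

lemma sum_C2_dedup {α : Type} [BEq α] [LawfulBEq α] (xs : List α) :
    ((PySem.List.dedup xs).map (fun v => pvC2 (xs.count v))).sum = pvPairs xs :=
  sum_C2_gen xs _ (PySem.List.nodup_dedup xs) (fun a ha => (PySem.List.mem_dedup xs a).mpr ha)

lemma group_fold (key : String → List Char) (words : List String) :
    words.foldl (fun (g : PySem.Dict (List Char) Int) w =>
      g.insert (key w) (g.getD (key w) 0 + 1)) PySem.Dict.empty
    = PySem.Dict.counter (words.map key) := by
  rw [← PySem.Dict.foldl_insert_getD_add_one_eq_counter, List.foldl_map]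

lemma counter_values (xs : List (List Char)) :
    (PySem.Dict.counter xs).values = (PySem.List.dedup xs).map (fun v => (xs.count v : Int)) := by
  simp only [PySem.Dict.values, PySem.Dict.items_counter, List.map_map, PySem.List.dedup_eq_ofList]
  rfl

lemma values_sum_fold (xs : List (List Char)) (t0 : Int) :
    (PySem.Dict.counter xs).values.foldl (fun t c => t + PySem.Int.floordiv (c * (c - 1)) 2) t0
    = t0 + pvPairs xs := by
  rw [show (fun (t c : Int) => t + PySem.Int.floordiv (c * (c - 1)) 2) = (fun t c => t + pvC2 c) from rfl,
    PySem.List.foldl_add, counter_values, List.map_map]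
  rw [show (pvC2 ∘ fun v => ((List.count v xs : Int))) = (fun v => pvC2 (List.count v xs)) from rfl,
    sum_C2_dedup]

lemma values_sub_fold (n : Int) (xs : List (List Char)) (t0 : Int) :
    (PySem.Dict.counter xs).values.foldl (fun t c => t - n * PySem.Int.floordiv (c * (c - 1)) 2) t0
    = t0 - n * pvPairs xs := by
  rw [show (fun (t c : Int) => t - n * PySem.Int.floordiv (c * (c - 1)) 2)
      = (fun t c => t + (-n) * pvC2 c) from by funext t c; show t - _ = _; unfold pvC2; ring]
  rw [PySem.List.foldl_add, counter_values, List.map_map]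
  rw [show ((fun c => (-n) * pvC2 c) ∘ fun v => ((List.count v xs : Int)))
      = (fun v => (-n) * pvC2 (List.count v xs)) from rfl]
  rw [List.sum_map_mul_left]
  rw [sum_C2_dedup]
  ring

lemma alt_eq (words : List String) :
    count_interesting_pairs_alt words =
      ((PySem.List.pyRange 0 (PySem.Str.len (PySem.List.pyGetD words 0 "")) 1).map
        (fun k => pvPairs (words.map (fun w => pvPattern (PySem.Str.len (PySem.List.pyGetD words 0 "")) k w.toList)))).sum
      - (PySem.Str.len (PySem.List.pyGetD words 0 "")) *
        pvPairs (words.map (fun w => PySem.List.slice w.toList none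
          (some (PySem.Str.len (PySem.List.pyGetD words 0 ""))))) := by
  unfold count_interesting_pairs_alt
  set n : Int := PySem.Str.len (PySem.List.pyGetD words 0 "") with hn
  have hfun : (fun (total k : Int) =>
      (words.foldl (fun (g : PySem.Dict (List Char) Int) w =>
        g.insert (pvPattern n k w.toList) (g.getD (pvPattern n k w.toList) 0 + 1)) PySem.Dict.empty).values.foldl
        (fun t c => t + PySem.Int.floordiv (c * (c - 1)) 2) total)
      = (fun total k => total + pvPairs (words.map (fun w => pvPattern n k w.toList))) := by
    funext total k
    rw [group_fold, values_sum_fold]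
  simp only []
  rw [group_fold, values_sub_fold, hfun,
    PySem.List.foldl_add (g := fun k => pvPairs (words.map (fun w => pvPattern n k w.toList))), zero_add]

lemma pvPairs_map {α β : Type} [BEq β] [LawfulBEq β] (g : α → β) (l : List α) :
    pvPairs (l.map g) = pvPC (fun a b => if g a == g b then 1 else 0) l := by
  induction l with
  | nil => rfl
  | cons x t ih =>
    simp only [List.map_cons, pvPairs, pvPC, ih]
    congr 1
    rw [PySem.List.sum_map_ite_one_zero]
    congr 1
    rw [List.count_eq_countP, List.countP_map]
    apply List.countP_congr
    intro b _
    simp [BEq.comm]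

lemma pvPC_zero {α : Type} (l : List α) : pvPC (fun _ _ => (0 : Int)) l = 0 := by
  induction l with
  | nil => rfl
  | cons x t ih => simp [pvPC, ih]

lemma pvPC_add {α : Type} (F G : α → α → Int) (l : List α) :
    pvPC (fun a b => F a b + G a b) l = pvPC F l + pvPC G l := by
  induction l with
  | nil => rfl
  | cons x t ih =>
    simp only [pvPC, ih, PySem.List.sum_map_add_int]
    ring

lemma pvPC_mul_left {α : Type} (c : Int) (F : α → α → Int) (l : List α) :
    pvPC (fun a b => c * F a b) l = c * pvPC F l := by
  induction l with
  | nil => simp [pvPC]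
  | cons x t ih =>
    simp only [pvPC, ih, List.sum_map_mul_left]
    ring

lemma pvPC_sub {α : Type} (F G : α → α → Int) (l : List α) :
    pvPC (fun a b => F a b - G a b) l = pvPC F l - pvPC G l := by
  have : (fun (a b : α) => F a b - G a b) = (fun a b => F a b + (-1) * G a b) := by
    funext a b; ring
  rw [this, pvPC_add, pvPC_mul_left]; ring

lemma pvPC_sum {α : Type} (ks : List Int) (G : Int → α → α → Int) (l : List α) :
    ((ks.map (fun k => pvPC (G k) l)).sum = pvPC (fun a b => (ks.map (fun k => G k a b)).sum) l) := by
  induction ks with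
  | nil => simp [pvPC_zero]
  | cons k ks ih =>
    simp only [List.map_cons, List.sum_cons, ih, ← pvPC_add]

lemma pvPC_congr {α : Type} (F G : α → α → Int) (l : List α)
    (h : ∀ a ∈ l, ∀ b ∈ l, F a b = G a b) : pvPC F l = pvPC G l := by
  induction l with
  | nil => rfl
  | cons x t ih =>
    simp only [pvPC]
    rw [ih (fun a ha b hb => h a (by simp [ha]) b (by simp [hb])),
      List.map_congr_left (fun b hb => h x (by simp) b (by simp [hb]))]

lemma index_pairs (Q : String → String → Bool) (ws : List String) :
    ((PySem.List.pyRange 0 (PySem.List.len ws) 1).map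
      (fun i => (((ws.drop ((i + 1).toNat)).countP (Q (PySem.List.pyGetD ws i ""))) : Int))).sum
    = pvPC (fun a b => if Q a b then (1 : Int) else 0) ws := by
  induction ws with
  | nil => rfl
  | cons w t ih =>
    rw [show PySem.List.len (w :: t) = ((t.length + 1 : Nat) : Int) by simp [PySem.List.len_eq],
      PySem.List.pyRange_zero_natCast, List.range_succ_eq_map]
    simp only [List.map_cons, List.map_map, List.sum_cons]
    have hterm : ∀ j : Nat,
        ((fun i => (((w :: t).drop ((i + 1).toNat)).countP (Q (PySem.List.pyGetD (w :: t) i "")) : Int))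
            ∘ (fun k : Nat => (k : Int)) ∘ Nat.succ) j
        = ((fun i => ((t.drop ((i + 1).toNat)).countP (Q (PySem.List.pyGetD t i "")) : Int))
            ∘ (fun k : Nat => (k : Int))) j := by
      intro j
      simp only [Function.comp_apply, Nat.succ_eq_add_one]
      have h1 : (((j + 1 : Nat) : Int) + 1).toNat = j + 2 := by omega
      have h2 : PySem.List.pyGetD (w :: t) ((j + 1 : Nat) : Int) "" = PySem.List.pyGetD t (j : Int) "" := by
        rw [PySem.List.pyGetD_natCast, PySem.List.pyGetD_natCast, List.getD_cons_succ]
      have h3 : ((j : Int) + 1).toNat = j + 1 := by omega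
      rw [h1, h2, h3, List.drop_succ_cons]
    rw [List.map_congr_left (fun j _ => hterm j), ← List.map_map, ← PySem.List.pyRange_zero_natCast,
      show ((t.length : Nat) : Int) = PySem.List.len t by simp [PySem.List.len_eq], ih]
    simp only [pvPC]
    congr 1
    rw [PySem.List.sum_map_ite_one_zero]
    norm_num [PySem.List.pyGetD_natCast]

lemma a_eq (words : List String) :
    count_interesting_pairs words = pvPC (fun a b =>
      if pvDiffLoopA a.toList b.toList
          (PySem.List.pyRange 0 (PySem.Str.len (PySem.List.pyGetD words 0 "")) 1) 0 = 1
        then (1 : Int) else 0) words := by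
  unfold count_interesting_pairs
  set n : Int := PySem.Str.len (PySem.List.pyGetD words 0 "") with hn
  rw [PySem.List.foldl_congr_mem _ _
    (g := fun (count i : Int) => count +
      (((words.drop ((i + 1).toNat)).countP
        (fun w => decide (pvDiffLoopA (PySem.List.pyGetD words i "").toList w.toList
          (PySem.List.pyRange 0 n 1) 0 = 1))) : Int)) 0 ?_]
  · rw [PySem.List.foldl_add, zero_add]
    rw [index_pairs (fun a b => decide (pvDiffLoopA a.toList b.toList (PySem.List.pyRange 0 n 1) 0 = 1)) words]
    simp only [decide_eq_true_eq]
  · intro acc i hi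
    have h0i : (0 : Int) ≤ i := (PySem.List.mem_pyRange_one.mp hi).1
    rw [PySem.List.foldl_ite_add_one
      (p := fun j => pvDiffLoopA (PySem.List.pyGetD words i "").toList
        (PySem.List.pyGetD words j "").toList (PySem.List.pyRange 0 n 1) 0 = 1)]
    congr 1
    rw [show ((words.drop ((i + 1).toNat)).countP
          (fun w => decide (pvDiffLoopA (PySem.List.pyGetD words i "").toList w.toList
            (PySem.List.pyRange 0 n 1) 0 = 1)))
        = (((PySem.List.pyRange (i + 1) (PySem.List.len words) 1).map
            (fun j => PySem.List.pyGetD words j "")).countP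
          (fun w => decide (pvDiffLoopA (PySem.List.pyGetD words i "").toList w.toList
            (PySem.List.pyRange 0 n 1) 0 = 1)))
      from by rw [PySem.List.map_pyGetD_pyRange words "" (by omega)]]
    rw [List.countP_map]
    rfl

lemma diffLoop_min (A' B' : List Char) :
    ∀ (ks : List Int) (d : Int), 0 ≤ d → d ≤ 1 →
      pvDiffLoopA A' B' ks d
      = min (d + ((ks.countP (fun k => decide (PySem.List.pyGetD A' k '?' ≠ PySem.List.pyGetD B' k '?'))) : Int)) 2 := by
  intro ks
  induction ks with
  | nil => intro d h0 h1; simp [pvDiffLoopA]; omega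
  | cons k ks ih =>
    intro d h0 h1
    have hnn : (0 : Int) ≤ ((ks.countP (fun k => decide (PySem.List.pyGetD A' k '?' ≠ PySem.List.pyGetD B' k '?'))) : Int) := by positivity
    by_cases hk : PySem.List.pyGetD A' k '?' ≠ PySem.List.pyGetD B' k '?'
    · rw [pvDiffLoopA, if_pos hk]
      by_cases hd : d + 1 > 1
      · rw [if_pos hd]
        simp [hk]
        omega
      · rw [if_neg hd, ih (d + 1) (by omega) (by omega)]
        simp [hk]
        omega
    · rw [pvDiffLoopA, if_neg hk, ih d h0 h1]
      simp [hk]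

lemma take_eq_iff (A' B' : List Char) (M : Nat) (ha : M ≤ A'.length) (hb : M ≤ B'.length) :
    A'.take M = B'.take M ↔ ∀ j < M, A'.getD j '?' = B'.getD j '?' := by
  constructor
  · intro h j hj
    have := congrArg (fun l => l.getD j '?') h
    simpa [List.getD_eq_getElem?_getD, List.getElem?_take, hj] using this
  · intro h
    apply List.ext_getElem
    · simp; omega
    · intro i h1 h2
      have hi : i < M := by simp at h1; omega
      have := h i hi
      rw [List.getD_eq_getElem?_getD, List.getD_eq_getElem?_getD,
        List.getElem?_eq_getElem (by omega), List.getElem?_eq_getElem (by omega)] at this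
      simpa [List.getElem_take] using this

lemma drop_take_eq_iff (A' B' : List Char) (s M : Nat) (ha : M ≤ A'.length) (hb : M ≤ B'.length)
    (hs : s ≤ M) :
    (A'.drop s).take (M - s) = (B'.drop s).take (M - s)
      ↔ ∀ j, s ≤ j → j < M → A'.getD j '?' = B'.getD j '?' := by
  constructor
  · intro h j hj1 hj2
    have := congrArg (fun l => l.getD (j - s) '?') h
    simp only [List.getD_eq_getElem?_getD, List.getElem?_take, List.getElem?_drop] at this
    rw [if_pos (by omega), if_pos (by omega), show s + (j - s) = j by omega] at this
    simpa [List.getD_eq_getElem?_getD] using this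
  · intro h
    apply List.ext_getElem
    · simp; omega
    · intro i h1 h2
      have hi : i < M - s := by simp at h1; omega
      have := h (s + i) (by omega) (by omega)
      rw [List.getD_eq_getElem?_getD, List.getD_eq_getElem?_getD,
        List.getElem?_eq_getElem (by omega), List.getElem?_eq_getElem (by omega)] at this
      simpa [List.getElem_take, List.getElem_drop] using this

lemma pattern_eq_iff (A' B' : List Char) (N k : Nat) (ha : N ≤ A'.length) (hb : N ≤ B'.length)
    (hk : k < N) :
    pvPattern (N : Int) (k : Int) A' = pvPattern (N : Int) (k : Int) B'
      ↔ ∀ j < N, j ≠ k → A'.getD j '?' = B'.getD j '?' := by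
  have hsl : ∀ w : List Char, pvPattern (N : Int) (k : Int) w
      = w.take k ++ (w.drop (k + 1)).take (N - (k + 1)) := by
    intro w
    unfold pvPattern
    rw [PySem.List.slice_to_natCast, show ((k : Int) + 1) = ((k + 1 : Nat) : Int) by push_cast; ring,
      PySem.List.slice_natCast]
  rw [hsl, hsl]
  constructor
  · intro h
    have hlen : (A'.take k).length = (B'.take k).length := by
      simp; omega
    obtain ⟨h1, h2⟩ := List.append_inj h hlen
    intro j hj hjk
    rcases Nat.lt_or_ge j k with hlt | hge
    · exact (take_eq_iff A' B' k (by omega) (by omega)).mp h1 j hlt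
    · exact (drop_take_eq_iff A' B' (k + 1) N (by omega) (by omega) (by omega)).mp h2 j (by omega) hj
  · intro h
    rw [(take_eq_iff A' B' k (by omega) (by omega)).mpr (fun j hj => h j (by omega) (by omega)),
      (drop_take_eq_iff A' B' (k + 1) N (by omega) (by omega) (by omega)).mpr
        (fun j hj1 hj2 => h j hj2 (by omega))]

lemma erase_count_char (A' B' : List Char) (N k : Nat) (hk : k < N) :
    (List.range N).countP (fun j => decide (A'.getD j '?' ≠ B'.getD j '?'))
    = (if A'.getD k '?' ≠ B'.getD k '?' then 1 else 0)
      + ((List.range N).erase k).countP (fun j => decide (A'.getD j '?' ≠ B'.getD j '?')) := by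
  have hperm : List.Perm (List.range N) (k :: (List.range N).erase k) :=
    List.perm_cons_erase (by simpa using hk)
  rw [hperm.countP_eq, List.countP_cons]
  by_cases h : A'.getD k '?' ≠ B'.getD k '?'
  · rw [if_pos h, show decide (A'.getD k '?' ≠ B'.getD k '?') = true from decide_eq_true h]
    simp
    omega
  · rw [if_neg h, show decide (A'.getD k '?' ≠ B'.getD k '?') = false from decide_eq_false h]
    simp

lemma patsum_eq (A' B' : List Char) (N : Nat) (ha : N ≤ A'.length) (hb : N ≤ B'.length) :
    ((List.range N).map (fun (k : Nat) =>
      if pvPattern (N : Int) (k : Int) A' == pvPattern (N : Int) (k : Int) B' then (1 : Int) else 0)).sum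
    = (if (List.range N).countP (fun j => decide (A'.getD j '?' ≠ B'.getD j '?')) = 0 then (N : Int)
       else if (List.range N).countP (fun j => decide (A'.getD j '?' ≠ B'.getD j '?')) = 1 then 1 else 0) := by
  set p : Nat → Bool := fun j => decide (A'.getD j '?' ≠ B'.getD j '?') with hp
  set c : Nat := (List.range N).countP p with hc
  rw [PySem.List.sum_map_ite_one_zero
    (p := fun (k : Nat) => pvPattern (N : Int) ((k : Int)) A' == pvPattern (N : Int) ((k : Int)) B')
    (xs := List.range N)]
  have hchar : ∀ k ∈ List.range N,
      (pvPattern (N : Int) (k : Int) A' == pvPattern (N : Int) (k : Int) B') = true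
      ↔ (decide (c = if p k then 1 else 0)) = true := by
    intro k hkmem
    have hk : k < N := by simpa using hkmem
    have hE : (pvPattern (N : Int) (k : Int) A' = pvPattern (N : Int) (k : Int) B')
        ↔ ((List.range N).erase k).countP p = 0 := by
      rw [pattern_eq_iff A' B' N k ha hb hk, List.countP_eq_zero]
      constructor
      · intro h j hj
        obtain ⟨hjk, hjmem⟩ := (List.Nodup.mem_erase_iff List.nodup_range).mp hj
        rw [hp]
        simp only [decide_eq_true_eq, ne_eq, not_not]
        exact h j (by simpa using hjmem) hjk
      · intro h j hjN hjk
        have hjm : j ∈ (List.range N).erase k :=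
          (List.Nodup.mem_erase_iff List.nodup_range).mpr ⟨hjk, by simpa using hjN⟩
        have := h j hjm
        rw [hp] at this
        simp only [decide_eq_true_eq, ne_eq, not_not] at this
        exact this
    have hsplit := erase_count_char A' B' N k hk
    rw [← hp, ← hc] at hsplit
    rw [beq_iff_eq, decide_eq_true_eq, hE]
    by_cases hpk : A'.getD k '?' ≠ B'.getD k '?'
    · rw [if_pos hpk] at hsplit
      have hpk' : p k = true := by rw [hp]; simpa using hpk
      rw [if_pos hpk']
      omega
    · rw [if_neg hpk] at hsplit
      have hpk' : p k = false := by rw [hp]; simpa using hpk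
      rw [hpk']
      simp only [Bool.false_eq_true, if_false]
      omega
  rw [List.countP_congr hchar]
  by_cases h0 : c = 0
  · rw [if_pos h0]
    have hcongr : ∀ k ∈ List.range N, (decide (c = if p k then 1 else 0)) = true ↔ (!(p k)) = true := by
      intro k _
      cases hpk : p k <;> simp [h0]
    rw [List.countP_congr hcongr]
    have hlen := List.length_eq_countP_add_countP p (l := List.range N)
    have hnp : (List.range N).countP (fun a => !(p a)) = (List.range N).countP (fun a => decide (¬ p a = true)) := by
      apply List.countP_congr; intro x _; cases p x <;> simp
    rw [hnp]
    simp only [List.length_range] at hlen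
    omega
  · by_cases h1 : c = 1
    · rw [if_neg h0, if_pos h1]
      have hcongr : ∀ k ∈ List.range N, (decide (c = if p k then 1 else 0)) = true ↔ p k = true := by
        intro k _
        cases hpk : p k <;> simp [h1]
      rw [List.countP_congr hcongr, ← hc, h1]
      norm_num
    · rw [if_neg h0, if_neg h1]
      have : (List.range N).countP (fun k => decide (c = if p k then 1 else 0)) = 0 := by
        rw [List.countP_eq_zero]
        intro k _
        cases hpk : p k <;> simp <;> omega
      rw [this]
      norm_num

lemma pair_core (A' B' : List Char) (N : Nat) (ha : N ≤ A'.length) (hb : N ≤ B'.length) :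
    ((PySem.List.pyRange 0 (N : Int) 1).map (fun k =>
        if pvPattern (N : Int) k A' == pvPattern (N : Int) k B' then (1 : Int) else 0)).sum
      - (N : Int) * (if PySem.List.slice A' none (some (N : Int)) == PySem.List.slice B' none (some (N : Int))
          then (1 : Int) else 0)
    = if pvDiffLoopA A' B' (PySem.List.pyRange 0 (N : Int) 1) 0 = 1 then 1 else 0 := by
  set p : Nat → Bool := fun j => decide (A'.getD j '?' ≠ B'.getD j '?') with hp
  set c : Nat := (List.range N).countP p with hc
  -- pattern sum
  rw [PySem.List.pyRange_zero_natCast, List.map_map,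
    show ((fun k => if pvPattern (N : Int) k A' == pvPattern (N : Int) k B' then (1 : Int) else 0)
        ∘ (fun k : Nat => (k : Int)))
      = (fun (k : Nat) => if pvPattern (N : Int) (k : Int) A' == pvPattern (N : Int) (k : Int) B'
          then (1 : Int) else 0) from rfl,
    patsum_eq A' B' N ha hb, ← hp, ← hc]
  -- prefix indicator
  rw [PySem.List.slice_to_natCast, PySem.List.slice_to_natCast]
  have hpre : (A'.take N == B'.take N) = decide (c = 0) := by
    rw [Bool.eq_iff_iff, beq_iff_eq, decide_eq_true_eq, take_eq_iff A' B' N ha hb, hc,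
      List.countP_eq_zero]
    constructor
    · intro h j hj
      rw [hp]
      simp only [decide_eq_true_eq, ne_eq, not_not]
      exact h j (by simpa using hj)
    · intro h j hjN
      have := h j (by simpa using hjN)
      rw [hp] at this
      simpa using this
  rw [hpre]
  -- diff loop
  rw [diffLoop_min A' B' _ 0 (by omega) (by omega)]
  have hcnt : ((List.range N).map (fun k : Nat => (k : Int))).countP
      (fun k => decide (PySem.List.pyGetD A' k '?' ≠ PySem.List.pyGetD B' k '?')) = c := by
    rw [List.countP_map, hc]
    apply List.countP_congr
    intro j _
    simp [PySem.List.pyGetD_natCast, hp]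
  rw [hcnt, zero_add]
  -- arithmetic
  by_cases h0 : c = 0
  · rw [if_pos h0]
    simp [h0]
  · by_cases h1 : c = 1
    · rw [if_neg h0, if_pos h1, h1]
      simp
    · rw [if_neg h0, if_neg h1]
      have : ¬ (min ((c : Int)) 2 = 1) := by omega
      rw [if_neg this]
      simp [h0]

lemma main_equiv (words : List String) (hpre : Pre_count_interesting_pairs words) :
    count_interesting_pairs words = count_interesting_pairs_alt words := by
  obtain ⟨hne, hlen⟩ := hpre
  rw [a_eq, alt_eq]
  obtain ⟨w0, t, rfl⟩ : ∃ w0 t, words = w0 :: t := by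
    cases words with
    | nil => exact absurd rfl hne
    | cons w0 t => exact ⟨w0, t, rfl⟩
  set words := w0 :: t with hw
  have hn : PySem.Str.len (PySem.List.pyGetD words 0 "") = ((w0.toList.length : Nat) : Int) := by
    rw [hw]
    simp [PySem.List.pyGetD_zero_cons]
  set N : Nat := w0.toList.length with hN
  rw [hn]
  rw [List.map_congr_left (fun k _ =>
    pvPairs_map (fun w => pvPattern ((N : Nat) : Int) k w.toList) words)]
  rw [pvPC_sum]
  rw [pvPairs_map (fun w => PySem.List.slice w.toList none (some ((N : Nat) : Int))) words]
  rw [← pvPC_mul_left, ← pvPC_sub]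
  apply pvPC_congr
  intro a ha b hb
  have hla : N ≤ a.toList.length := by
    have := hlen a ha
    simpa [hw] using this
  have hlb : N ≤ b.toList.length := by
    have := hlen b hb
    simpa [hw] using this
  exact (pair_core a.toList b.toList N hla hlb).symm

-- ===== VERDICT (by name: the statement is the Claim_ definition above) =====
theorem count_interesting_pairs_spec : Claim_equal_count_interesting_pairs := by
  intro words _ hpre
  exact main_equiv words hpre
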